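-- pv_equiv track=rewrite | github.com/Farmer-from-Space/coding_test | programmers/148652.py | solution
-- ===== SOURCE A (Python) =====
-- def solution(n, l, r):
--     def count_num(num):
--         if num <= 5: return '11011'[:num].count('1')
--
--         j = 1
--         while 5 ** (1+j) < num:
--             j += 1
--
--         m = num // (5**j)
--         rm = num % (5**j)
--
--         answer = m * (4 ** j)
--
--         if m >= 3:
--             answer -= (4 ** j)
--         if m == 2:
--             return answer
--         else:
--             return answer + count_num(rm)
--
--     return count_num(r) - count_num(l-1)
-- ===== SOURCE B (Python) =====
-- def solution(n, l, r):
--     def count_num(num):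
--         # base case identical to A: prefix of the seed block (handles num <= 5, incl. negatives)
--         if num <= 5:
--             return '11011'[:num].count('1')
--         # extract base-5 digits of num, least significant first
--         digits = []
--         x = num
--         while x > 0:
--             digits.append(x % 5)
--             x //= 5
--         # single scan from the most significant digit: standard digit-DP count,
--         # stopping at the first digit equal to 2
--         total = 0
--         i = len(digits) - 1
--         while i >= 0:
--             d = digits[i]
--             total += (d - (1 if d > 2 else 0)) * 4 ** i
--             if d == 2:
--                 break
--             i -= 1
--         return total
--     return count_num(r) - count_num(l - 1)
-- ===== Notes on version B (the rewrite author's own statement) =====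
-- stated objective: alternative
-- what changed: Replaces A's recursive leading-block peeling (an incremental power search and one recursive call per base-5 block) by a one-shot base-5 digit extraction followed by a single most-significant-first digit scan that stops at the first digit 2.
import Mathlib
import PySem

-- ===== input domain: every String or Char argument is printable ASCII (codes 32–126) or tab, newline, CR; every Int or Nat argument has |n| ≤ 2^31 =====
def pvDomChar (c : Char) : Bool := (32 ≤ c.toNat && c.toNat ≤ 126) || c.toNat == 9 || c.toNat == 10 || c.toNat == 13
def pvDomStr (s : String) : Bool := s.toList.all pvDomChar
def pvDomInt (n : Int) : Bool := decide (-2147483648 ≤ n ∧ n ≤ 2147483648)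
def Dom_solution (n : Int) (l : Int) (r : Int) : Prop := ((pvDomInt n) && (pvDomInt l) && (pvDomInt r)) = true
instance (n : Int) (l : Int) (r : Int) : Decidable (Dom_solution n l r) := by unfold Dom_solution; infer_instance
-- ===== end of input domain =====

-- B replaces A's recursive leading-block peeling (incremental power search plus one recursive
-- call per base-5 block) by a one-shot base-5 digit extraction followed by a single MSB-first
-- digit scan (it does fewer big-integer power computations). Loops are ported with a structural fuel
-- argument (a pure totality device: the fuel provably never runs out on the iterations the
-- Python performs).

-- ===== PORT A =====

-- `while 5 ** (1+j) < num: j += 1`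
def solFindJGo (num : Int) : Nat → Nat → Nat
  | 0, j => j
  | fuel + 1, j => if (5:Int) ^ (1 + j) < num then solFindJGo num fuel (j + 1) else j

def solFindJ (num : Int) (j : Nat) : Nat := solFindJGo num num.toNat j

-- A's recursive `count_num`; recursion depth is bounded by the argument, so `num.toNat + 1`
-- fuel always suffices (each recursive argument is a remainder, ≥ 0 and strictly smaller)
def solCountGo : Nat → Int → Int
  | 0, _ => 0
  | fuel + 1, num =>
    if num ≤ 5 then ((PySem.Str.count (PySem.Str.slice "11011" none (some num)) "1" : Nat) : Int)
    else
      let j := solFindJ num 1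
      let m := PySem.Int.floordiv num ((5:Int) ^ j)
      let rm := PySem.Int.mod num ((5:Int) ^ j)
      let answer := m * (4:Int) ^ j
      let answer2 := if 3 ≤ m then answer - (4:Int) ^ j else answer
      if m = 2 then answer2 else answer2 + solCountGo fuel rm

def solCount (num : Int) : Int := solCountGo (num.toNat + 1) num

def solution (n : Int) (l : Int) (r : Int) : Int := solCount r - solCount (l - 1)

-- ===== PORT B =====

-- `while x > 0: digits.append(x % 5); x //= 5`  (Source B's loop guard is `x > 0`);
-- x shrinks strictly while positive, so `x.toNat` fuel always suffices
def altDigitsGo : Nat → Int → List Int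
  | 0, _ => []
  | fuel + 1, x =>
    if 0 < x then PySem.Int.mod x 5 :: altDigitsGo fuel (PySem.Int.floordiv x 5) else []

def altDigits (x : Int) : List Int := altDigitsGo x.toNat x

-- the MSB-first scan `while i >= 0: … if d == 2: break`, run on digits.reverse;
-- the index i of Source B is the length of the remaining (less significant) digit list
def altScan : List Int → Int
  | [] => 0
  | d :: rest =>
      (d - (if 2 < d then 1 else 0)) * (4:Int) ^ rest.length +
        (if d = 2 then 0 else altScan rest)

-- Source B's `count_num`
def altCount (num : Int) : Int :=
  if num ≤ 5 then ((PySem.Str.count (PySem.Str.slice "11011" none (some num)) "1" : Nat) : Int)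
  else altScan (altDigits num).reverse

def solution_alt (n : Int) (l : Int) (r : Int) : Int := altCount r - altCount (l - 1)

-- ===== PRECONDITION & SPEC =====
def Spec_solution (n : Int) (l : Int) (r : Int) (out : Int) : Prop := out = solution_alt n l r
instance (n : Int) (l : Int) (r : Int) (out : Int) : Decidable (Spec_solution n l r out) := by unfold Spec_solution; infer_instance

-- ===== CLAIM (what is proved, stated in full; the proofs are below) =====
def Claim_equal_solution : Prop := ∀ (n : Int) (l : Int) (r : Int), Dom_solution n l r → Spec_solution n l r (solution n l r)

-- ===== LEMMAS AND PROOFS =====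

-- the power search only ever leaves a power below num behind (no fuel needed)
theorem solFindJGo_lt (num : Int) :
    ∀ (fuel j : Nat), (5:Int) ^ j < num → (5:Int) ^ (solFindJGo num fuel j) < num := by
  intro fuel
  induction fuel with
  | zero => intro j h; exact h
  | succ f ih =>
    intro j h
    rw [solFindJGo]
    split
    · next hc => exact ih (j + 1) (by rwa [Nat.add_comm 1 j] at hc)
    · exact h

theorem solFindJ_lt (num : Int) (j : Nat) (h : (5:Int) ^ j < num) :
    (5:Int) ^ (solFindJ num j) < num := solFindJGo_lt num num.toNat j h

-- with enough fuel the loop exits on its own guard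
theorem solFindJGo_le (num : Int) :
    ∀ (fuel j : Nat), num ≤ (5:Int) ^ (1 + j + fuel) →
      num ≤ (5:Int) ^ (solFindJGo num fuel j + 1) := by
  intro fuel
  induction fuel with
  | zero =>
    intro j h
    rw [solFindJGo]
    rw [show 1 + j + 0 = j + 1 from by omega] at h
    exact h
  | succ f ih =>
    intro j h
    rw [solFindJGo]
    split
    · exact ih (j + 1) (by rw [show 1 + (j + 1) + f = 1 + j + (f + 1) from by omega]; exact h)
    · next hc =>
      have : (5:Int) ^ (1 + j) = 5 ^ (j + 1) := by rw [Nat.add_comm]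
      omega

theorem solFindJ_le (num : Int) (j : Nat) : num ≤ (5:Int) ^ (solFindJ num j + 1) := by
  apply solFindJGo_le
  have h1 : num ≤ (5:Int) ^ num.toNat := by
    rcases le_or_gt num 0 with h | h
    · have : (0:Int) < 5 ^ num.toNat := by positivity
      omega
    · have hn : num = (num.toNat : Int) := by omega
      have h2 : num.toNat < 5 ^ num.toNat := Nat.lt_pow_self (by norm_num)
      calc num = (num.toNat : Int) := hn
        _ ≤ ((5 ^ num.toNat : Nat) : Int) := by exact_mod_cast h2.le
        _ = (5:Int) ^ num.toNat := by push_cast; ring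
  calc num ≤ (5:Int) ^ num.toNat := h1
    _ ≤ (5:Int) ^ (1 + j + num.toNat) := by
        apply pow_le_pow_right₀ (by norm_num) (by omega)

-- the result of solCountGo does not depend on the fuel once it covers the argument
theorem solCountGo_irrel :
    ∀ (f1 f2 : Nat) (num : Int), num.toNat < f1 → num.toNat < f2 →
      solCountGo f1 num = solCountGo f2 num := by
  intro f1
  induction f1 with
  | zero => intro f2 num h1 _; omega
  | succ f ih =>
    intro f2 num h1 h2
    cases f2 with
    | zero => omega
    | succ g =>
      rw [solCountGo, solCountGo]
      by_cases h5 : num ≤ 5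
      · rw [if_pos h5, if_pos h5]
      · rw [if_neg h5, if_neg h5]
        have hjlt : (5:Int) ^ (solFindJ num 1) < num :=
          solFindJ_lt num 1 (by rw [pow_one]; omega)
        have hp : (0:Int) < 5 ^ (solFindJ num 1) := by positivity
        have hrm0 := PySem.Int.mod_nonneg num hp
        have hrml := PySem.Int.mod_lt num hp
        have hrec : solCountGo f (PySem.Int.mod num (5 ^ solFindJ num 1))
            = solCountGo g (PySem.Int.mod num (5 ^ solFindJ num 1)) :=
          ih g _ (by omega) (by omega)
        simp only [hrec]

-- one unfolding of solCount at a non-base argument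
theorem solCount_step (num : Int) (h5 : ¬ num ≤ 5) :
    solCount num =
      (let j := solFindJ num 1
       let m := PySem.Int.floordiv num ((5:Int) ^ j)
       let rm := PySem.Int.mod num ((5:Int) ^ j)
       let answer := m * (4:Int) ^ j
       let answer2 := if 3 ≤ m then answer - (4:Int) ^ j else answer
       if m = 2 then answer2 else answer2 + solCount rm) := by
  rw [solCount, solCountGo, if_neg h5]
  have hjlt : (5:Int) ^ (solFindJ num 1) < num :=
    solFindJ_lt num 1 (by rw [pow_one]; omega)
  have hp : (0:Int) < 5 ^ (solFindJ num 1) := by positivity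
  have hrm0 := PySem.Int.mod_nonneg num hp
  have hrml := PySem.Int.mod_lt num hp
  have hrec : solCountGo num.toNat (PySem.Int.mod num (5 ^ solFindJ num 1))
      = solCount (PySem.Int.mod num (5 ^ solFindJ num 1)) :=
    solCountGo_irrel num.toNat _ _ (by omega) (by omega)
  simp only [hrec]

theorem solCount_base (num : Int) (h5 : num ≤ 5) :
    solCount num = ((PySem.Str.count (PySem.Str.slice "11011" none (some num)) "1" : Nat) : Int) := by
  rw [solCount, solCountGo, if_pos h5]

-- the digit extraction does not depend on the fuel once it covers the argument
theorem altDigitsGo_irrel :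
    ∀ (f1 f2 : Nat) (x : Int), x.toNat ≤ f1 → x.toNat ≤ f2 →
      altDigitsGo f1 x = altDigitsGo f2 x := by
  intro f1
  induction f1 with
  | zero =>
    intro f2 x h1 _
    have hx : ¬ 0 < x := by omega
    cases f2 with
    | zero => rfl
    | succ g => rw [altDigitsGo, altDigitsGo, if_neg hx]
  | succ f ih =>
    intro f2 x h1 h2
    by_cases hx : 0 < x
    · cases f2 with
      | zero => omega
      | succ g =>
        rw [altDigitsGo, altDigitsGo, if_pos hx, if_pos hx]
        have hdiv : PySem.Int.floordiv x 5 = x / 5 :=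
          PySem.Int.floordiv_eq_ediv_of_pos (by norm_num)
        have := ih g (PySem.Int.floordiv x 5) (by omega) (by omega)
        rw [this]
    · cases f2 with
      | zero => rw [altDigitsGo, altDigitsGo, if_neg hx]
      | succ g => rw [altDigitsGo, altDigitsGo, if_neg hx, if_neg hx]

theorem altDigits_pos (x : Int) (h : 0 < x) :
    altDigits x = PySem.Int.mod x 5 :: altDigits (PySem.Int.floordiv x 5) := by
  obtain ⟨k, hk⟩ : ∃ k, x.toNat = k + 1 := ⟨x.toNat - 1, by omega⟩
  have hdiv : PySem.Int.floordiv x 5 = x / 5 :=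
    PySem.Int.floordiv_eq_ediv_of_pos (by norm_num)
  rw [altDigits, hk, altDigitsGo, if_pos h, altDigits]
  have := altDigitsGo_irrel k (PySem.Int.floordiv x 5).toNat (PySem.Int.floordiv x 5)
    (by omega) (by omega)
  rw [this]

theorem altDigits_nonpos (x : Int) (h : x ≤ 0) : altDigits x = [] := by
  rw [altDigits, show x.toNat = 0 from by omega]
  rfl

-- leading zeros contribute nothing to the scan
theorem altScan_zeros (t : Nat) (ds : List Int) :
    altScan (List.replicate t 0 ++ ds) = altScan ds := by
  induction t with
  | zero => simp
  | succ t ih => simp [List.replicate_succ, altScan, ih]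

theorem altDigits_len : ∀ (k : Nat) (x : Int), 0 ≤ x → x < 5 ^ k →
    (altDigits x).length ≤ k := by
  intro k
  induction k with
  | zero =>
    intro x h1 h2
    have hx : x = 0 := by simp at h2; omega
    rw [hx, altDigits_nonpos 0 le_rfl]; simp
  | succ k ih =>
    intro x h1 h2
    by_cases hx : 0 < x
    · rw [altDigits_pos x hx, PySem.Int.floordiv_eq_ediv_of_pos (by norm_num : (0:Int) < 5)]
      have hpow : (5:Int) ^ (k + 1) = 5 ^ k * 5 := by ring
      have hlt : x / 5 < 5 ^ k := by omega
      have := ih (x / 5) (by omega) hlt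
      simpa using this
    · rw [altDigits_nonpos x (by omega)]; simp

-- peeling the leading base-5 block from the digit list
theorem altDigits_split : ∀ (j : Nat) (m rm : Int), 1 ≤ m → m ≤ 4 → 0 ≤ rm → rm < 5 ^ j →
    altDigits (m * 5 ^ j + rm) =
      altDigits rm ++ List.replicate (j - (altDigits rm).length) 0 ++ [m] := by
  intro j
  induction j with
  | zero =>
    intro m rm h1 h2 h3 h4
    have hrm : rm = 0 := by simp at h4; omega
    subst hrm
    rw [altDigits_nonpos 0 le_rfl]
    rw [show m * 5 ^ 0 + 0 = m by ring]
    rw [altDigits_pos m (by omega),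
        PySem.Int.mod_eq_emod_of_pos (by norm_num : (0:Int) < 5),
        PySem.Int.floordiv_eq_ediv_of_pos (by norm_num : (0:Int) < 5)]
    have e1 : m % 5 = m := by omega
    have e2 : m / 5 = 0 := by omega
    rw [e1, e2, altDigits_nonpos 0 le_rfl]
    simp
  | succ j ih =>
    intro m rm h1 h2 h3 h4
    have hpow : (5:Int) ^ (j + 1) = 5 ^ j * 5 := by ring
    have hpj : (0:Int) < 5 ^ j := by positivity
    have hx : 0 < m * 5 ^ (j + 1) + rm := by nlinarith
    rw [altDigits_pos _ hx,
        PySem.Int.mod_eq_emod_of_pos (by norm_num : (0:Int) < 5),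
        PySem.Int.floordiv_eq_ediv_of_pos (by norm_num : (0:Int) < 5)]
    have harg : m * 5 ^ (j + 1) + rm = (m * 5 ^ j) * 5 + rm := by rw [hpow]; ring
    rw [harg]
    have e1 : (m * 5 ^ j * 5 + rm) % 5 = rm % 5 := by omega
    have e2 : (m * 5 ^ j * 5 + rm) / 5 = m * 5 ^ j + rm / 5 := by omega
    rw [e1, e2]
    have hrec := ih m (rm / 5) h1 h2 (by omega) (by omega)
    rw [hrec]
    by_cases hrm : 0 < rm
    · rw [altDigits_pos rm hrm,
          PySem.Int.mod_eq_emod_of_pos (by norm_num : (0:Int) < 5),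
          PySem.Int.floordiv_eq_ediv_of_pos (by norm_num : (0:Int) < 5)]
      simp [List.cons_append, Nat.succ_sub_succ]
    · have hrm0 : rm = 0 := by omega
      subst hrm0
      norm_num
      rw [altDigits_nonpos 0 le_rfl]
      simp [List.replicate_succ]

-- the two count_num's agree on the small base cases
theorem key_small (x : Int) (h1 : 0 ≤ x) (h2 : x ≤ 5) :
    altScan (altDigits x).reverse = solCount x := by
  interval_cases x <;> decide

-- main agreement of the two count_num's, by strong induction on the argument
theorem key_aux : ∀ (N : Nat) (x : Int), x.toNat < N → 0 ≤ x →
    altScan (altDigits x).reverse = solCount x := by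
  intro N
  induction N with
  | zero => intro x h _; omega
  | succ N ih =>
    intro x hN hx
    by_cases h5 : x ≤ 5
    · exact key_small x hx h5
    · have hjlt : (5:Int) ^ (solFindJ x 1) < x := solFindJ_lt x 1 (by rw [pow_one]; omega)
      have hjle : x ≤ (5:Int) ^ (solFindJ x 1 + 1) := solFindJ_le x 1
      set j := solFindJ x 1 with hj
      have hp : (0:Int) < 5 ^ j := by positivity
      set m := PySem.Int.floordiv x ((5:Int) ^ j) with hmdef
      set rm := PySem.Int.mod x ((5:Int) ^ j) with hrmdef
      have hdm : m * 5 ^ j + rm = x := PySem.Int.floordiv_mul_add_mod x (5 ^ j)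
      have hrm0 : 0 ≤ rm := PySem.Int.mod_nonneg x hp
      have hrml : rm < 5 ^ j := PySem.Int.mod_lt x hp
      have hpow : (5:Int) ^ (j + 1) = 5 ^ j * 5 := by ring
      have hm1 : 1 ≤ m := (PySem.Int.le_floordiv_iff_mul_le hp).2 (by linarith)
      have hm5 : m ≤ 5 := by
        have h6 : x < 6 * 5 ^ j := by nlinarith
        have := (PySem.Int.floordiv_lt_iff_lt_mul hp).2 h6
        omega
      have hih : altScan (altDigits rm).reverse = solCount rm :=
        ih rm (by omega) hrm0
      rw [solCount_step x h5]
      simp only [← hj, ← hmdef, ← hrmdef]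
      clear_value j m rm
      by_cases hm4 : m ≤ 4
      · have hsplit := altDigits_split j m rm hm1 hm4 hrm0 hrml
        have hlen := altDigits_len j rm hrm0 hrml
        rw [show x = m * 5 ^ j + rm from hdm.symm, hsplit]
        rw [List.reverse_append, List.reverse_append]
        simp only [List.reverse_singleton, List.reverse_replicate, List.singleton_append]
        rw [show altScan (m :: (List.replicate (j - (altDigits rm).length) 0 ++ (altDigits rm).reverse))
              = (m - (if 2 < m then 1 else 0)) * (4:Int) ^ (List.replicate (j - (altDigits rm).length) (0:Int) ++ (altDigits rm).reverse).length
                + (if m = 2 then 0 else altScan (List.replicate (j - (altDigits rm).length) 0 ++ (altDigits rm).reverse))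
            from rfl]
        rw [altScan_zeros, hih]
        have hlen2 : (List.replicate (j - (altDigits rm).length) (0:Int) ++ (altDigits rm).reverse).length = j := by
          simp; omega
        rw [hlen2]
        have h4 : (0:Int) ≤ 4 ^ j := by positivity
        interval_cases m <;> norm_num <;> ring
      · have hm5' : m = 5 := by omega
        have h55 : m * 5 ^ j = 5 * 5 ^ j := by rw [hm5']
        have hrme : rm = 0 := by omega
        have hxval : x = 1 * 5 ^ (j + 1) + 0 := by rw [hpow]; omega
        have hsplit := altDigits_split (j + 1) 1 0 (by norm_num) (by norm_num) le_rfl (by positivity)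
        rw [altDigits_nonpos 0 le_rfl] at hsplit
        rw [hxval, hsplit]
        simp only [List.nil_append, List.reverse_append, List.reverse_singleton,
          List.reverse_replicate, List.singleton_append]
        rw [show altScan ((1:Int) :: List.replicate (j + 1 - (List.length ([]:List Int))) 0)
              = (1 - (if (2:Int) < 1 then 1 else 0)) * (4:Int) ^ (List.replicate (j + 1 - (List.length ([]:List Int))) (0:Int)).length
                + (if (1:Int) = 2 then 0 else altScan (List.replicate (j + 1 - (List.length ([]:List Int))) 0))
            from rfl]
        rw [show List.replicate (j + 1 - (List.length ([]:List Int))) (0:Int)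
              = List.replicate (j + 1 - (List.length ([]:List Int))) (0:Int) ++ [] from (List.append_nil _).symm]
        rw [altScan_zeros]
        rw [hm5', hrme]
        rw [show solCount 0 = 0 from by decide]
        simp [altScan]
        ring

theorem count_eq (x : Int) : solCount x = altCount x := by
  by_cases h : x ≤ 5
  · rw [solCount_base x h, altCount, if_pos h]
  · rw [altCount, if_neg h]
    exact (key_aux (x.toNat + 1) x (by omega) (by omega)).symm

-- ===== VERDICT (by name: the statement is the Claim_ definition above) =====
theorem solution_spec : Claim_equal_solution := by
  intro n l r _
  show solution n l r = solution_alt n l r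
  unfold solution solution_alt
  rw [count_eq r, count_eq (l - 1)]
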